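-- pv_equiv track=rewrite | github.com/gianordoli/autocomplete_helpers | print/01_image_scraper/image_scraper.py | checkExtension
-- ===== SOURCE A (Python) =====
-- extensions = ['.jpg', '.jpeg', '.gif', '.png', '.tif', '.tiff', '.bmp'];
--
-- def checkExtension(string):
--     string = string.lower()
--     extension = None
--     for i in range(len(extensions)):
--         # if extensions[i] in string:
--         if string.endswith(extensions[i]):
--             extension = extensions[i]
--             break
--     return extension
-- ===== SOURCE B (Python) =====
-- EXTENSIONS = {'.jpg', '.jpeg', '.gif', '.png', '.tif', '.tiff', '.bmp'}
--
-- def checkExtension(string):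
--     # One left-to-right pass: keep the segment from the most recent '.' onward,
--     # then a single set lookup, instead of seven endswith suffix scans.
--     tail = None
--     for c in string.lower():
--         if c == '.':
--             tail = '.'
--         elif tail is not None:
--             tail += c
--     if tail is not None and tail in EXTENSIONS:
--         return tail
--     return None
-- ===== Notes on version B (the rewrite author's own statement) =====
-- stated objective: alternative
-- what changed: Replaces the loop of seven endswith suffix scans by a single left-to-right pass that tracks the segment from the most recent dot onward, followed by one set membership lookup.
import Mathlib
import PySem

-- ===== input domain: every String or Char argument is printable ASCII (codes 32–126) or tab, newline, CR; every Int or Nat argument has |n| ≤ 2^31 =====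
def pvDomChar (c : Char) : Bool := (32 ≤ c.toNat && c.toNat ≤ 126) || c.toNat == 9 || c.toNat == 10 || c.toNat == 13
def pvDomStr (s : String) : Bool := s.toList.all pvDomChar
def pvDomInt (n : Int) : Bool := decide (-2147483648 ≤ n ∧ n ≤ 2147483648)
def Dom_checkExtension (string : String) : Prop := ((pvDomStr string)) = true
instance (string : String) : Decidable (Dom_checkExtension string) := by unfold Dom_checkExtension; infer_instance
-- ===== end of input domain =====

-- B replaces A's seven endswith suffix scans by one left-to-right pass that keeps the
-- segment from the most recent dot onward, followed by a single membership lookup (objective: alternative).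

-- ===== PORT A =====
def pvExtensions : List String := [".jpg", ".jpeg", ".gif", ".png", ".tif", ".tiff", ".bmp"]

-- A's for-loop over the extensions with break: return the first extension s ends with.
def pvFindExt (s : String) : List String → Option String
  | [] => none
  | e :: rest => if PySem.Str.endswith s e then some e else pvFindExt s rest

def checkExtension (string : String) : Option String :=
  pvFindExt (PySem.Str.lower string) pvExtensions

-- ===== PORT B =====
-- one step of B's loop: on '.' restart the tail, otherwise extend it if started
def pvStep (acc : Option (List Char)) (c : Char) : Option (List Char) :=
  if c == '.' then some ['.'] else acc.map (· ++ [c])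

def checkExtension_alt (string : String) : Option String :=
  match (PySem.Chars.lower string.toList).foldl pvStep none with
  | none => none
  | some t => if String.ofList t ∈ pvExtensions then some (String.ofList t) else none

-- ===== PRECONDITION & SPEC =====
def Spec_checkExtension (string : String) (out : Option String) : Prop := out = checkExtension_alt string
instance (string : String) (out : Option String) : Decidable (Spec_checkExtension string out) := by unfold Spec_checkExtension; infer_instance

-- ===== CLAIM (what is proved, stated in full; the proofs are below) =====
def Claim_equal_checkExtension : Prop := ∀ (string : String), Dom_checkExtension string → Spec_checkExtension string (checkExtension string)

-- ===== LEMMAS AND PROOFS =====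

-- every extension is '.' followed by a dot-free tail
theorem pvExt_shape (e : String) (he : e ∈ pvExtensions) :
    ∃ w, e.toList = '.' :: w ∧ '.' ∉ w := by
  fin_cases he <;> exact ⟨_, rfl, by decide⟩

-- folding B's step over a dot-free block just appends it
theorem pvFold_nodot (w : List Char) (hw : '.' ∉ w) (a : List Char) :
    w.foldl pvStep (some a) = some (a ++ w) := by
  induction w generalizing a with
  | nil => simp
  | cons c w ih =>
    have hc : c ≠ '.' := by rintro rfl; exact hw (List.mem_cons_self ..)
    have hw' : '.' ∉ w := fun h => hw (List.mem_cons_of_mem _ h)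
    simp only [List.foldl_cons, pvStep, beq_iff_eq, hc, if_false, Option.map_some]
    rw [ih hw']
    simp

-- if '.'::w (w dot-free) is a suffix of l, B's fold over l produces exactly it
theorem pvFold_of_suffix (l w : List Char) (hw : '.' ∉ w) (h : ('.' :: w) <:+ l) :
    l.foldl pvStep none = some ('.' :: w) := by
  obtain ⟨u, rfl⟩ := h
  rw [List.foldl_append, List.foldl_cons]
  have : pvStep (u.foldl pvStep none) '.' = some ['.'] := by simp [pvStep]
  rw [this, pvFold_nodot w hw]
  simp

-- whatever B's fold produces is a suffix of l of the form '.'::w with w dot-free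
theorem pvFold_some (l t : List Char) (h : l.foldl pvStep none = some t) :
    t <:+ l ∧ ∃ w, t = '.' :: w ∧ '.' ∉ w := by
  induction l using List.reverseRecOn generalizing t with
  | nil => simp at h
  | append_singleton l c ih =>
    rw [List.foldl_append, List.foldl_cons, List.foldl_nil] at h
    by_cases hc : c = '.'
    · subst hc
      simp only [pvStep, beq_self_eq_true, if_pos, Option.some.injEq] at h
      subst h
      exact ⟨⟨l, rfl⟩, [], rfl, by simp⟩
    · simp only [pvStep, beq_iff_eq, hc, if_false] at h
      cases hfl : l.foldl pvStep none with
      | none => rw [hfl] at h; simp at h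
      | some t' =>
        rw [hfl] at h
        simp only [Option.map_some, Option.some.injEq] at h
        subst h
        obtain ⟨⟨u, rfl⟩, w', hw'1, hw'2⟩ := ih t' hfl
        refine ⟨?_, w' ++ [c], ?_, ?_⟩
        · exact ⟨u, by simp⟩
        · simp [hw'1]
        · intro hmem
          rcases List.mem_append.mp hmem with h1 | h1
          · exact hw'2 h1
          · simp at h1; exact hc h1.symm

-- A's loop returns the unique extension whose char list is t, if any
theorem pvFindExt_eq (s : String) (t : List Char) (es : List String)
    (h : ∀ e ∈ es, (PySem.Str.endswith s e = true ↔ e.toList = t)) :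
    pvFindExt s es = if String.ofList t ∈ es then some (String.ofList t) else none := by
  induction es with
  | nil => simp [pvFindExt]
  | cons e rest ih =>
    have he := h e (List.mem_cons_self ..)
    have hrest : ∀ e' ∈ rest, (PySem.Str.endswith s e' = true ↔ e'.toList = t) :=
      fun e' h' => h e' (List.mem_cons_of_mem _ h')
    have hstep : pvFindExt s (e :: rest)
        = if PySem.Str.endswith s e = true then some e else pvFindExt s rest := rfl
    by_cases hend : PySem.Str.endswith s e = true
    · have ht : e.toList = t := he.mp hend
      have heq : e = String.ofList t := by
        apply String.toList_inj.mp; rw [ht]; simp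
      have hmem : String.ofList t ∈ e :: rest := by rw [← heq]; exact List.mem_cons_self ..
      rw [hstep, if_pos hend, if_pos hmem, heq]
    · have hne : e.toList ≠ t := fun h' => hend (he.mpr h')
      have hne' : String.ofList t ≠ e := by
        intro h'; apply hne; rw [← h']; simp
      rw [hstep, if_neg hend, ih hrest]
      simp [List.mem_cons, hne']

-- A's loop returns none when no extension matches
theorem pvFindExt_none (s : String) (es : List String)
    (h : ∀ e ∈ es, PySem.Str.endswith s e = false) :
    pvFindExt s es = none := by
  induction es with
  | nil => rfl
  | cons e rest ih =>
    have := h e (List.mem_cons_self ..)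
    simp only [pvFindExt, this, Bool.false_eq_true, if_false]
    exact ih fun e' h' => h e' (List.mem_cons_of_mem _ h')

-- endswith of the lowered string, in list form
theorem pvEndswith_iff (string e : String) :
    PySem.Str.endswith (PySem.Str.lower string) e = true ↔
      e.toList <:+ PySem.Chars.lower string.toList := by
  rw [PySem.Str.endswith_eq, PySem.Str.toList_lower, PySem.Chars.endswith_iff]

-- ===== VERDICT (by name: the statement is the Claim_ definition above) =====
theorem checkExtension_spec : Claim_equal_checkExtension := by
  intro string _
  unfold Spec_checkExtension checkExtension checkExtension_alt
  set l := PySem.Chars.lower string.toList with hl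
  cases hF : l.foldl pvStep none with
  | none =>
    rw [pvFindExt_none]
    intro e he
    by_contra hend
    have hend' : PySem.Str.endswith (PySem.Str.lower string) e = true := by
      cases h' : PySem.Str.endswith (PySem.Str.lower string) e
      · exact absurd h' hend
      · rfl
    have hsuf := (pvEndswith_iff string e).mp hend'
    obtain ⟨w, hw1, hw2⟩ := pvExt_shape e he
    rw [hw1] at hsuf
    rw [pvFold_of_suffix l w hw2 hsuf] at hF
    simp at hF
  | some t =>
    obtain ⟨hsuf, w, hw1, hw2⟩ := pvFold_some l t hF
    rw [pvFindExt_eq (PySem.Str.lower string) t pvExtensions]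
    intro e he
    rw [pvEndswith_iff]
    constructor
    · intro hs
      obtain ⟨w', hw'1, hw'2⟩ := pvExt_shape e he
      rw [hw'1] at hs ⊢
      have := pvFold_of_suffix l w' hw'2 hs
      rw [this] at hF
      exact (Option.some.injEq _ _).mp hF
    · intro he'
      rw [he']
      exact hsuf
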